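-- pv_equiv track=rewrite | github.com/210010/finetune_bertsequence_classifier | utils.py | build_segment_ids
-- ===== SOURCE A (Python) =====
-- def build_segment_ids(input_ids):
--     """ Create segment ids to differentiate sentence1 and sentence2 """
--     segment_ids = []
--     for seq in input_ids:
--         segment_id = []
--         id_ = 0
--         for token_id in seq:
--             segment_id.append(id_)
--             # 102 : [SEP]
--             if token_id == 102:
--                 id_ +=1
--                 id_ %= 2
--         segment_ids.append(segment_id)
--     return segment_ids
-- ===== SOURCE B (Python) =====
-- def build_segment_ids(input_ids):
--     """ Create segment ids to differentiate sentence1 and sentence2 """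
--     result = []
--     for seq in input_ids:
--         flags = [1 if token_id == 102 else 0 for token_id in seq]
--         # exclusive prefix sums: prefix[i] = number of [SEP] tokens strictly before i
--         prefix = []
--         total = 0
--         for f in flags:
--             prefix.append(total)
--             total += f
--         result.append([c % 2 for c in prefix])
--     return result
-- ===== Notes on version B (the rewrite author's own statement) =====
-- stated objective: alternative
-- what changed: Replaces the single stateful toggle loop with a three-pass table construction: a [SEP]-flag list, an exclusive prefix-sum count table, and a map of each count mod 2.
import Mathlib
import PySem

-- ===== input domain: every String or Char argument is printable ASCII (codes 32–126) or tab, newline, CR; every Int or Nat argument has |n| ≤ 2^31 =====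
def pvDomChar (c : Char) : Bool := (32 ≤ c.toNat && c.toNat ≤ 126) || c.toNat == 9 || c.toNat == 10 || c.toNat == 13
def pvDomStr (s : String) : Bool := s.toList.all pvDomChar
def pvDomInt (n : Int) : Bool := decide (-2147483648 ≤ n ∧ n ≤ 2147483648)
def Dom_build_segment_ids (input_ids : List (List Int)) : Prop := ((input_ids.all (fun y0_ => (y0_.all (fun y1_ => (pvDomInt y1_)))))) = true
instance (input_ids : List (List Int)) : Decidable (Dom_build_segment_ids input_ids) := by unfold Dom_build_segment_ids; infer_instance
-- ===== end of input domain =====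

-- B replaces A's single stateful toggle loop by a flag list + exclusive prefix-sum table + mod-2 map (alternative decomposition, same cost).


-- ===== PORT A =====
-- literal port of A: one pass per sequence, appending id_ then toggling it at token 102
def build_segment_ids (input_ids : List (List Int)) : List (List Int) :=
  input_ids.foldl (fun segment_ids seq =>
    let p := seq.foldl (fun (st : List Int × Int) token_id =>
      let st' := (st.1 ++ [st.2], st.2)
      if token_id == 102 then (st'.1, PySem.Int.mod (st'.2 + 1) 2) else st') ([], 0)
    segment_ids ++ [p.1]) []

-- ===== PORT B =====
-- literal port of B: flag list, exclusive prefix-sum table, then map mod 2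
def build_segment_ids_alt (input_ids : List (List Int)) : List (List Int) :=
  input_ids.foldl (fun result seq =>
    let flags := seq.map (fun token_id => if token_id == 102 then (1 : Int) else 0)
    let pr := flags.foldl (fun (st : List Int × Int) f => (st.1 ++ [st.2], st.2 + f)) ([], 0)
    result ++ [pr.1.map (fun c => PySem.Int.mod c 2)]) []

-- ===== PRECONDITION & SPEC =====
def Spec_build_segment_ids (input_ids : List (List Int)) (out : List (List Int)) : Prop := out = build_segment_ids_alt input_ids
instance (input_ids : List (List Int)) (out : List (List Int)) : Decidable (Spec_build_segment_ids input_ids out) := by unfold Spec_build_segment_ids; infer_instance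

-- ===== CLAIM (what is proved, stated in full; the proofs are below) =====
def Claim_equal_build_segment_ids : Prop := ∀ (input_ids : List (List Int)), Dom_build_segment_ids input_ids → Spec_build_segment_ids input_ids (build_segment_ids input_ids)

-- ===== LEMMAS AND PROOFS =====

-- common specification of one sequence's segment ids, counting from c SEPs seen
def segSpec (c : Int) : List Int → List Int
  | [] => []
  | t :: ts => PySem.Int.mod c 2 :: segSpec (if t = 102 then c + 1 else c) ts

lemma pmod2 (c : Int) : PySem.Int.mod c 2 = c % 2 :=
  PySem.Int.mod_eq_emod_of_pos (by norm_num)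

lemma mod_toggle (c : Int) (hc : 0 ≤ c) :
    PySem.Int.mod (PySem.Int.mod c 2 + 1) 2 = PySem.Int.mod (c + 1) 2 := by
  simp only [pmod2]; omega

lemma aLoop (seq : List Int) : ∀ (acc : List Int) (c : Int), 0 ≤ c →
    (seq.foldl (fun (st : List Int × Int) token_id =>
      let st' := (st.1 ++ [st.2], st.2)
      if token_id == 102 then (st'.1, PySem.Int.mod (st'.2 + 1) 2) else st')
      (acc, PySem.Int.mod c 2)).1 = acc ++ segSpec c seq := by
  induction seq with
  | nil => intro acc c _; simp [segSpec]
  | cons t ts ih =>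
    intro acc c hc
    simp only [List.foldl_cons, segSpec]
    by_cases ht : t = 102
    · simp only [ht, beq_self_eq_true, if_pos]
      rw [mod_toggle c hc]
      have := ih (acc ++ [PySem.Int.mod c 2]) (c + 1) (by omega)
      simpa using this
    · simp only [ht, if_neg, beq_iff_eq, if_false]
      have := ih (acc ++ [PySem.Int.mod c 2]) c hc
      simpa [ht] using this

-- B's prefix loop produces the exclusive prefix sums, described directly
def sumsSpec (s : Int) : List Int → List Int
  | [] => []
  | t :: ts => s :: sumsSpec (s + (if t = 102 then 1 else 0)) ts

lemma bLoop (seq : List Int) : ∀ (acc : List Int) (s : Int),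
    ((seq.map (fun token_id => if token_id == 102 then (1 : Int) else 0)).foldl
      (fun (st : List Int × Int) f => (st.1 ++ [st.2], st.2 + f)) (acc, s)).1
    = acc ++ sumsSpec s seq := by
  induction seq with
  | nil => intro acc s; simp [sumsSpec]
  | cons t ts ih =>
    intro acc s
    simp only [List.map_cons, List.foldl_cons, sumsSpec]
    by_cases ht : t = 102
    · simpa [ht] using ih (acc ++ [s]) (s + 1)
    · simpa [ht] using ih (acc ++ [s]) s

lemma sums_mod (seq : List Int) : ∀ (s : Int), 0 ≤ s →
    (sumsSpec s seq).map (fun c => PySem.Int.mod c 2) = segSpec s seq := by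
  induction seq with
  | nil => intro s _; simp [sumsSpec, segSpec]
  | cons t ts ih =>
    intro s hs
    by_cases ht : t = 102
    · simp only [sumsSpec, segSpec, List.map_cons, if_pos ht]
      rw [ih (s + 1) (by omega)]
    · simp only [sumsSpec, segSpec, List.map_cons, if_neg ht, add_zero]
      rw [ih s hs]

lemma inner_eq (seq : List Int) :
    (seq.foldl (fun (st : List Int × Int) token_id =>
      let st' := (st.1 ++ [st.2], st.2)
      if token_id == 102 then (st'.1, PySem.Int.mod (st'.2 + 1) 2) else st')
      ([], 0)).1
    = ((seq.map (fun token_id => if token_id == 102 then (1 : Int) else 0)).foldl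
        (fun (st : List Int × Int) f => (st.1 ++ [st.2], st.2 + f)) ([], 0)).1.map
        (fun c => PySem.Int.mod c 2) := by
  have h0 : (0 : Int) = PySem.Int.mod 0 2 := by decide
  rw [bLoop seq [] 0]
  rw [show (([], (0 : Int)) : List Int × Int) = ([], PySem.Int.mod 0 2) from by rw [← h0]]
  rw [aLoop seq [] 0 le_rfl]
  rw [← sums_mod seq 0 le_rfl]
  simp

lemma outer (input_ids : List (List Int)) : ∀ (acc : List (List Int)),
    input_ids.foldl (fun segment_ids seq =>
      let p := seq.foldl (fun (st : List Int × Int) token_id =>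
        let st' := (st.1 ++ [st.2], st.2)
        if token_id == 102 then (st'.1, PySem.Int.mod (st'.2 + 1) 2) else st') ([], 0)
      segment_ids ++ [p.1]) acc
    = input_ids.foldl (fun result seq =>
        let flags := seq.map (fun token_id => if token_id == 102 then (1 : Int) else 0)
        let pr := flags.foldl (fun (st : List Int × Int) f => (st.1 ++ [st.2], st.2 + f)) ([], 0)
        result ++ [pr.1.map (fun c => PySem.Int.mod c 2)]) acc := by
  induction input_ids with
  | nil => intro acc; rfl
  | cons seq rest ih =>
    intro acc
    simp only [List.foldl_cons]
    rw [inner_eq seq]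
    exact ih _

-- ===== VERDICT (by name: the statement is the Claim_ definition above) =====
theorem build_segment_ids_spec : Claim_equal_build_segment_ids := by
  intro input_ids _
  unfold Spec_build_segment_ids build_segment_ids build_segment_ids_alt
  exact outer input_ids []
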